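-- pv_equiv track=rewrite | github.com/dianaemal/medical-triag | rag/retriever.py | filter_by_metadata
-- ===== SOURCE A (Python) =====
-- def filter_by_metadata(results, max_docs = 6):
--     high = []
--     low = []
--     mid = []
--
--     for doc in results:
--
--         urgency = doc["metadata"]["urgency"]
--
--         if urgency == "high":
--             high.append(doc)
--         elif urgency == "medium":
--             mid.append(doc)
--         else:
--             low.append(doc)
--
--     final = high.copy()
--
--     for g in [mid, low]:
--         for doc in g:
--             if len(final) < max_docs:
--                 final.append(doc)
--
--
--     return final
-- ===== SOURCE B (Python) =====
-- def filter_by_metadata(results, max_docs=6):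
--     prio = {"high": 0, "medium": 1}
--     ordered = sorted(results, key=lambda d: prio.get(d["metadata"]["urgency"], 2))
--     n_high = sum(1 for d in results if d["metadata"]["urgency"] == "high")
--     return ordered[:max(max_docs, n_high)]
-- ===== Notes on version B (the rewrite author's own statement) =====
-- stated objective: alternative
-- what changed: Replaces the three explicit urgency buckets and the nested capped-append loops with one stable sort by an urgency rank (high=0, medium=1, else=2) followed by a single slice ordered[:max(max_docs, n_high)].
import Mathlib
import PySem

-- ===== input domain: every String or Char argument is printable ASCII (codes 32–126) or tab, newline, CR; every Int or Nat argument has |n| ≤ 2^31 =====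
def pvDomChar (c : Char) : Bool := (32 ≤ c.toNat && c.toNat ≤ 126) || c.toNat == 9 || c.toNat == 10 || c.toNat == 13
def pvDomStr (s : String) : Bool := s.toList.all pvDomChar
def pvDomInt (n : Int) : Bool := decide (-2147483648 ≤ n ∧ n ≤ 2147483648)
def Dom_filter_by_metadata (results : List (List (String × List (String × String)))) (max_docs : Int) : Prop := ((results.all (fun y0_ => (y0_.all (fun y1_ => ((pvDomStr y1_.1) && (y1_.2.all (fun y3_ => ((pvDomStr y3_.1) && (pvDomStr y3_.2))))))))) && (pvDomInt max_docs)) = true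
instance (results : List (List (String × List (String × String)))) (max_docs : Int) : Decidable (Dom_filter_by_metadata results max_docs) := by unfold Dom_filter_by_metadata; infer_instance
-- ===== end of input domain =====

-- B sorts the docs once by an urgency rank (stable sort) and returns one slice of the sorted
-- list — same value as A's three buckets with a capped append loop; objective: alternative.

-- ===== PORT A =====
-- doc["metadata"]["urgency"]: first-match association-list lookups; the .getD defaults are
-- reached only outside Pre_filter_by_metadata (where the Python raises KeyError).
def pvUrg (doc : List (String × List (String × String))) : String :=
  ((List.lookup "metadata" doc).getD []).lookup "urgency" |>.getD ""

def filter_by_metadata (results : List (List (String × List (String × String)))) (max_docs : Int) : List (List (String × List (String × String))) :=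
  let buckets := results.foldl
    (fun (acc : List (List (String × List (String × String))) × List (List (String × List (String × String))) × List (List (String × List (String × String)))) doc =>
      let urgency := pvUrg doc
      if urgency == "high" then (acc.1 ++ [doc], acc.2.1, acc.2.2)
      else if urgency == "medium" then (acc.1, acc.2.1 ++ [doc], acc.2.2)
      else (acc.1, acc.2.1, acc.2.2 ++ [doc]))
    ([], [], [])
  let final := buckets.1
  [buckets.2.1, buckets.2.2].foldl
    (fun final g =>
      g.foldl (fun final doc => if PySem.List.len final < max_docs then final ++ [doc] else final) final)
    final

-- ===== PORT B =====
-- prio.get(d["metadata"]["urgency"], 2)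
def pvPrio (doc : List (String × List (String × String))) : Int :=
  (List.lookup (pvUrg doc) [("high", (0 : Int)), ("medium", 1)]).getD 2

def filter_by_metadata_alt (results : List (List (String × List (String × String)))) (max_docs : Int) : List (List (String × List (String × String))) :=
  let ordered := PySem.List.sorted results pvPrio false
  let nHigh : Int := (results.filter (fun d => pvUrg d == "high")).length
  PySem.List.slice ordered none (some (max max_docs nHigh))

-- ===== PRECONDITION & SPEC =====
-- Pre_ excludes exactly the inputs where some doc lacks the "metadata" key or its metadata
-- lacks the "urgency" key: there both Pythons raise KeyError.
def Pre_filter_by_metadata (results : List (List (String × List (String × String)))) (max_docs : Int) : Prop :=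
  results.all (fun doc =>
    (List.lookup "metadata" doc).isSome
      && (((List.lookup "metadata" doc).getD []).lookup "urgency").isSome) = true

instance (results : List (List (String × List (String × String)))) (max_docs : Int) : Decidable (Pre_filter_by_metadata results max_docs) := by unfold Pre_filter_by_metadata; infer_instance

def pvWitness_filter_by_metadata : (List (List (String × List (String × String)))) × Int :=
  ([[("metadata", [("urgency", "high")])], [("metadata", [("urgency", "low")])]], 6)

def Spec_filter_by_metadata (results : List (List (String × List (String × String)))) (max_docs : Int) (out : List (List (String × List (String × String)))) : Prop := out = filter_by_metadata_alt results max_docs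
instance (results : List (List (String × List (String × String)))) (max_docs : Int) (out : List (List (String × List (String × String)))) : Decidable (Spec_filter_by_metadata results max_docs out) := by unfold Spec_filter_by_metadata; infer_instance

-- ===== CLAIM (what is proved, stated in full; the proofs are below) =====
def Claim_equal_filter_by_metadata : Prop := ∀ (results : List (List (String × List (String × String)))) (max_docs : Int), Dom_filter_by_metadata results max_docs → Pre_filter_by_metadata results max_docs → Spec_filter_by_metadata results max_docs (filter_by_metadata results max_docs)

-- ===== LEMMAS AND PROOFS =====

-- abbreviations for the three urgency buckets (proof-side only)
def pvFH (xs : List (List (String × List (String × String)))) : List (List (String × List (String × String))) :=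
  xs.filter (fun d => pvUrg d == "high")
def pvFM (xs : List (List (String × List (String × String)))) : List (List (String × List (String × String))) :=
  xs.filter (fun d => pvUrg d == "medium")
def pvFL (xs : List (List (String × List (String × String)))) : List (List (String × List (String × String))) :=
  xs.filter (fun d => !(pvUrg d == "high") && !(pvUrg d == "medium"))

lemma pvPrio_cases (d : List (String × List (String × String))) :
    (pvUrg d = "high" ∧ pvPrio d = 0)
    ∨ (pvUrg d ≠ "high" ∧ pvUrg d = "medium" ∧ pvPrio d = 1)
    ∨ (pvUrg d ≠ "high" ∧ pvUrg d ≠ "medium" ∧ pvPrio d = 2) := by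
  by_cases h1 : pvUrg d = "high"
  · left; refine ⟨h1, ?_⟩; simp [pvPrio, List.lookup, h1]
  · have e1 : (pvUrg d == "high") = false := beq_eq_false_iff_ne.mpr h1
    by_cases h2 : pvUrg d = "medium"
    · right; left; refine ⟨h1, h2, ?_⟩; simp [pvPrio, List.lookup, h2]
    · have e2 : (pvUrg d == "medium") = false := beq_eq_false_iff_ne.mpr h2
      right; right; refine ⟨h1, h2, ?_⟩; simp [pvPrio, List.lookup, e1, e2]

lemma insertBy_split {α : Type} (before : α → α → Bool) (x : α) (ys zs : List α)
    (h1 : ∀ y ∈ ys, before x y = false) (h2 : ∀ z ∈ zs, before x z = true) :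
    PySem.List.insertBy before x (ys ++ zs) = ys ++ x :: zs := by
  induction ys with
  | nil =>
    cases zs with
    | nil => simp [PySem.List.insertBy]
    | cons z zs' => simp [PySem.List.insertBy, h2 z (by simp)]
  | cons y ys' ih =>
    simp only [List.cons_append, PySem.List.insertBy, h1 y (by simp)]
    simp only [Bool.false_eq_true, if_false, List.cons.injEq, true_and]
    exact ih (fun y hy => h1 y (by simp [hy])) 

lemma mem_pvFH {xs : List (List (String × List (String × String)))} {y} (h : y ∈ pvFH xs) : pvPrio y = 0 := by
  have := (List.mem_filter.mp h).2
  rcases pvPrio_cases y with ⟨_, hp⟩ | ⟨hn, _, _⟩ | ⟨hn, _, _⟩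
  · exact hp
  all_goals simp_all

lemma mem_pvFM {xs : List (List (String × List (String × String)))} {y} (h : y ∈ pvFM xs) : pvPrio y = 1 := by
  have := (List.mem_filter.mp h).2
  rcases pvPrio_cases y with ⟨hm, _⟩ | ⟨_, _, hp⟩ | ⟨_, hn, _⟩
  · simp_all
  · exact hp
  · simp_all

lemma mem_pvFL {xs : List (List (String × List (String × String)))} {y} (h : y ∈ pvFL xs) : pvPrio y = 2 := by
  have := (List.mem_filter.mp h).2
  rcases pvPrio_cases y with ⟨hm, _⟩ | ⟨_, hm, _⟩ | ⟨_, _, hp⟩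
  · simp_all [pvFL]
  · simp_all [pvFL]
  · exact hp

-- the stable sort by priority IS the three buckets in order
lemma sorted_tri (xs : List (List (String × List (String × String)))) :
    PySem.List.sorted xs pvPrio false = pvFH xs ++ pvFM xs ++ pvFL xs := by
  induction xs using List.reverseRecOn with
  | nil => simp [PySem.List.sorted, pvFH, pvFM, pvFL]
  | append_singleton xs x ih =>
    rw [PySem.List.sorted_eq_foldl_insertBy] at *
    rw [List.foldl_append]
    simp only [List.foldl_cons, List.foldl_nil]
    rw [ih]
    rcases pvPrio_cases x with ⟨hu, hp⟩ | ⟨hn, hu, hp⟩ | ⟨hn1, hn2, hp⟩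
    · rw [List.append_assoc,
        insertBy_split _ x (pvFH xs) (pvFM xs ++ pvFL xs)
          (fun y hy => by simp [hp, mem_pvFH hy])
          (fun z hz => by
            rcases List.mem_append.mp hz with hz | hz
            · simp [hp, mem_pvFM hz]
            · simp [hp, mem_pvFL hz])]
      simp [pvFH, pvFM, pvFL, List.filter_append, hu]
    · rw [insertBy_split _ x (pvFH xs ++ pvFM xs) (pvFL xs)
          (fun y hy => by
            rcases List.mem_append.mp hy with hy | hy
            · simp [hp, mem_pvFH hy]
            · simp [hp, mem_pvFM hy])
          (fun z hz => by simp [hp, mem_pvFL hz])]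
      simp [pvFH, pvFM, pvFL, List.filter_append, hu, List.append_assoc]
    · rw [
        PySem.List.insertBy_of_forall_not_before _ x _
          (fun y hy => by
            rcases List.mem_append.mp hy with hy | hy
            · rcases List.mem_append.mp hy with hy | hy
              · simp [hp, mem_pvFH hy]
              · simp [hp, mem_pvFM hy]
            · simp [hp, mem_pvFL hy])]
      simp [pvFH, pvFM, pvFL, List.filter_append, hn1, hn2, List.append_assoc]

-- A's bucket loop computes the three filters
lemma buckets_eq (xs : List (List (String × List (String × String))))
    (a b c : List (List (String × List (String × String)))) :
    xs.foldl
      (fun (acc : List (List (String × List (String × String))) × List (List (String × List (String × String))) × List (List (String × List (String × String)))) doc =>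
        let urgency := pvUrg doc
        if urgency == "high" then (acc.1 ++ [doc], acc.2.1, acc.2.2)
        else if urgency == "medium" then (acc.1, acc.2.1 ++ [doc], acc.2.2)
        else (acc.1, acc.2.1, acc.2.2 ++ [doc]))
      (a, b, c)
      = (a ++ pvFH xs, b ++ pvFM xs, c ++ pvFL xs) := by
  induction xs generalizing a b c with
  | nil => simp [pvFH, pvFM, pvFL]
  | cons d xs ih =>
    by_cases h1 : pvUrg d = "high"
    · simp only [List.foldl_cons, h1]
      rw [ih]
      simp [pvFH, pvFM, pvFL, h1]
    · by_cases h2 : pvUrg d = "medium"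
      · simp only [List.foldl_cons]
        rw [if_neg (by simp [h1]), if_pos (by simp [h2]), ih]
        simp [pvFH, pvFM, pvFL, h2]
      · simp only [List.foldl_cons]
        rw [if_neg (by simp [h1]), if_neg (by simp [h2]), ih]
        simp [pvFH, pvFM, pvFL, h1, h2]

-- the capped append loop is a take
lemma cap_foldl (m : Int) (rest init : List (List (String × List (String × String)))) :
    rest.foldl (fun acc doc => if PySem.List.len acc < m then acc ++ [doc] else acc) init
      = init ++ rest.take ((m - init.length).toNat) := by
  induction rest generalizing init with
  | nil => simp
  | cons d rest ih =>
    rw [List.foldl_cons]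
    by_cases h : (init.length : Int) < m
    · rw [if_pos (by simpa [PySem.List.len_eq] using h), ih]
      have hk : (m - (init.length : Int)).toNat = (m - ((init ++ [d]).length : Int)).toNat + 1 := by
        simp only [List.length_append, List.length_cons, List.length_nil]
        omega
      rw [hk, List.take_succ_cons]
      simp
    · rw [if_neg (by simpa [PySem.List.len_eq] using h), ih]
      have hk : (m - (init.length : Int)).toNat = 0 := by omega
      rw [hk, List.take_zero, List.take_zero]

-- ===== VERDICT (by name: the statement is the Claim_ definition above) =====
theorem filter_by_metadata_spec : Claim_equal_filter_by_metadata := by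
  intro results max_docs _ _
  unfold Spec_filter_by_metadata filter_by_metadata filter_by_metadata_alt
  simp only [buckets_eq results [] [] [], List.nil_append,
    List.foldl_cons, List.foldl_nil, sorted_tri]
  rw [← List.foldl_append, cap_foldl]
  have hH : (results.filter (fun d => pvUrg d == "high")).length = (pvFH results).length := rfl
  have h0 : (0:Int) ≤ max max_docs ((pvFH results).length : Int) := le_trans (by positivity) (le_max_right _ _)
  rw [hH, PySem.List.slice_to _ h0]
  have h1 : (pvFH results).take (max max_docs ((pvFH results).length : Int)).toNat = pvFH results := by
    apply List.take_of_length_le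
    omega
  conv_rhs => rw [List.append_assoc, List.take_append, h1]
  congr 2
  have hn : ((pvFH results).length : Int) ≤ max max_docs ((pvFH results).length : Int) := le_max_right _ _
  rcases le_total max_docs ((pvFH results).length : Int) with hc | hc
  · rw [max_eq_right hc]; omega
  · rw [max_eq_left hc]; omega
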